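-- pv_equiv track=rewrite | github.com/realxpen/Novapilot | scripts/jumia_workflow.py | normalize_search_terms
-- ===== SOURCE A (Python) =====
-- def _dedupe_terms(terms: list[str]) -> list[str]:
--     seen: set[str] = set()
--     ordered: list[str] = []
--     for term in terms:
--         normalized = " ".join(str(term).strip().lower().split())
--         if not normalized or normalized in seen:
--             continue
--         seen.add(normalized)
--         ordered.append(str(term).strip())
--     return ordered
--
-- def normalize_search_terms(category: str, query: str, terms: list[str]) -> list[str]:
--     cleaned = [str(term).strip() for term in terms if str(term).strip()]
--     if category.lower() != "laptop":
--         return cleaned or [query]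
--
--     laptop_fallback_terms = [
--         "Dell Latitude 7490 16GB 512GB laptop",
--         "HP EliteBook 840 G6 16GB 512GB laptop",
--         "Dell Inspiron 15 Core i5 16GB 512GB laptop",
--         "Lenovo IdeaPad 3 Core i5 16GB 512GB laptop",
--         "laptop Core i5 16GB 512GB",
--     ]
--
--     non_thinkpad = [term for term in cleaned if "thinkpad" not in term.lower()]
--     thinkpad = [term for term in cleaned if "thinkpad" in term.lower()]
--
--     if not non_thinkpad:
--         return laptop_fallback_terms
--
--     # Keep user terms first, but push thinkpad to the end and always include strong fallback terms.
--     return _dedupe_terms(non_thinkpad + laptop_fallback_terms + thinkpad)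
-- ===== SOURCE B (Python) =====
-- def _dedupe_terms(terms: list[str]) -> list[str]:
--     seen: set[str] = set()
--     ordered: list[str] = []
--     for term in terms:
--         normalized = " ".join(str(term).strip().lower().split())
--         if not normalized or normalized in seen:
--             continue
--         seen.add(normalized)
--         ordered.append(str(term).strip())
--     return ordered
--
-- def normalize_search_terms(category: str, query: str, terms: list[str]) -> list[str]:
--     cleaned = [str(term).strip() for term in terms if str(term).strip()]
--     if category.lower() != "laptop":
--         return cleaned or [query]
--
--     laptop_fallback_terms = [
--         "Dell Latitude 7490 16GB 512GB laptop",
--         "HP EliteBook 840 G6 16GB 512GB laptop",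
--         "Dell Inspiron 15 Core i5 16GB 512GB laptop",
--         "Lenovo IdeaPad 3 Core i5 16GB 512GB laptop",
--         "laptop Core i5 16GB 512GB",
--     ]
--
--     # tag each user term with its group: 0 = plain user term, 2 = thinkpad term
--     tagged = [(2 if "thinkpad" in term.lower() else 0, term) for term in cleaned]
--     if all(group == 2 for group, _ in tagged):
--         return laptop_fallback_terms
--
--     # fallback terms form group 1; one stable sort by group yields the final order
--     tagged += [(1, term) for term in laptop_fallback_terms]
--     tagged.sort(key=lambda pair: pair[0])
--     return _dedupe_terms([term for _, term in tagged])
-- ===== Notes on version B (the rewrite author's own statement) =====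
-- stated objective: alternative
-- what changed: Instead of partitioning cleaned terms into non-thinkpad/thinkpad with two comprehensions and concatenating three blocks, B tags each term with a group key (0 user, 1 fallback, 2 thinkpad) and obtains the final order by one stable sort on that key before the same order-preserving dedup.
import Mathlib
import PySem

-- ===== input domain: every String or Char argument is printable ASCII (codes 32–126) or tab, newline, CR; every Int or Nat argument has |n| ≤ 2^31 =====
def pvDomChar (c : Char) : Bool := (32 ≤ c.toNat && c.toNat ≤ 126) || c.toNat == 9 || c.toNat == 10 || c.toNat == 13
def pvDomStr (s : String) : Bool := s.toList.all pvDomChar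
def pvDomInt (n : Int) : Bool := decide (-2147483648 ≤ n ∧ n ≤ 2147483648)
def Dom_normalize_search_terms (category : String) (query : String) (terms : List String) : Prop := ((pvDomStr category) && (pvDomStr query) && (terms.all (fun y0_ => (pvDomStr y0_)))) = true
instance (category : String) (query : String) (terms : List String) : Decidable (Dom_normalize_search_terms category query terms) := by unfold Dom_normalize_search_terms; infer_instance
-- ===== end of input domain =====

-- B replaces the two partition comprehensions and three-block concatenation by a stable sort
-- on a three-valued group key, feeding the same order-preserving dedup (alternative decomposition).

-- ===== PORT A =====
-- shared module constant (the fallback list literal, identical in Source A and Source B)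
def pvFallbackTerms : List String :=
  ["Dell Latitude 7490 16GB 512GB laptop",
   "HP EliteBook 840 G6 16GB 512GB laptop",
   "Dell Inspiron 15 Core i5 16GB 512GB laptop",
   "Lenovo IdeaPad 3 Core i5 16GB 512GB laptop",
   "laptop Core i5 16GB 512GB"]

-- the '"thinkpad" in term.lower()' test, textually shared by Source A and Source B
def pvThink (term : String) : Bool := PySem.Str.isIn "thinkpad" (PySem.Str.lower term)

-- _dedupe_terms, identical helper in Source A and Source B: seen-set + ordered output loop
def pvDedupeTerms (terms : List String) : List String :=
  (terms.foldl (fun (st : PySem.Set String × List String) term =>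
      let normalized := PySem.Str.join " " (PySem.Str.split₀ (PySem.Str.lower (PySem.Str.strip term)))
      if normalized == "" || PySem.Set.contains st.1 normalized then st
      else (PySem.Set.add st.1 normalized, st.2 ++ [PySem.Str.strip term]))
    (PySem.Set.empty, [])).2

def normalize_search_terms (category : String) (query : String) (terms : List String) : List String :=
  let cleaned := (terms.map PySem.Str.strip).filter (fun s => !(s == ""))
  if PySem.Str.lower category ≠ "laptop" then
    (if cleaned == [] then [query] else cleaned)
  else
    let non_thinkpad := cleaned.filter (fun t => !(pvThink t))
    let thinkpad := cleaned.filter (fun t => pvThink t)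
    if non_thinkpad == [] then pvFallbackTerms
    else pvDedupeTerms (non_thinkpad ++ pvFallbackTerms ++ thinkpad)

-- ===== PORT B =====
def normalize_search_terms_alt (category : String) (query : String) (terms : List String) : List String :=
  let cleaned := (terms.map PySem.Str.strip).filter (fun s => !(s == ""))
  if PySem.Str.lower category ≠ "laptop" then
    (if cleaned == [] then [query] else cleaned)
  else
    let tagged := cleaned.map (fun term => ((if pvThink term then (2 : Nat) else 0), term))
    if tagged.all (fun p => p.1 == 2) then pvFallbackTerms
    else
      let tagged2 := tagged ++ pvFallbackTerms.map (fun term => ((1 : Nat), term))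
      pvDedupeTerms ((PySem.List.sorted tagged2 (fun p => p.1) false).map Prod.snd)

-- ===== PRECONDITION & SPEC =====
def Spec_normalize_search_terms (category : String) (query : String) (terms : List String) (out : List String) : Prop := out = normalize_search_terms_alt category query terms
instance (category : String) (query : String) (terms : List String) (out : List String) : Decidable (Spec_normalize_search_terms category query terms out) := by unfold Spec_normalize_search_terms; infer_instance

-- ===== CLAIM (what is proved, stated in full; the proofs are below) =====
def Claim_equal_normalize_search_terms : Prop := ∀ (category : String) (query : String) (terms : List String), Dom_normalize_search_terms category query terms → Spec_normalize_search_terms category query terms (normalize_search_terms category query terms)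

-- ===== LEMMAS AND PROOFS =====

theorem pvInsertBy_cons {α : Type} (p : α → α → Bool) (x y : α) (ys : List α) :
    PySem.List.insertBy p x (y :: ys) =
      if p x y then x :: y :: ys else y :: PySem.List.insertBy p x ys := rfl

theorem pvInsertBy_skip {α : Type} (p : α → α → Bool) (x : α) (ys zs : List α)
    (h : ∀ y ∈ ys, p x y = false) :
    PySem.List.insertBy p x (ys ++ zs) = ys ++ PySem.List.insertBy p x zs := by
  induction ys with
  | nil => simp
  | cons y ys ih =>
    simp only [List.cons_append, pvInsertBy_cons, h y (by simp)]
    simp only [Bool.false_eq_true, if_false, List.cons.injEq, true_and]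
    exact ih (fun y hy => h y (by simp [hy]))

theorem pvInsertBy_front {α : Type} (p : α → α → Bool) (x : α) (zs : List α)
    (h : ∀ z ∈ zs, p x z = true) :
    PySem.List.insertBy p x zs = x :: zs := by
  cases zs with
  | nil => rfl
  | cons z zs => simp [pvInsertBy_cons, h z (by simp)]

theorem pvFoldlInsThree {α : Type} (xs : List (Nat × α)) :
    ∀ (l0 l1 l2 : List (Nat × α)),
    (∀ q ∈ l0, q.1 = 0) → (∀ q ∈ l1, q.1 = 1) → (∀ q ∈ l2, q.1 = 2) →
    (∀ q ∈ xs, q.1 ≤ 2) →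
    xs.foldl (fun acc x => PySem.List.insertBy (fun a b => decide (a.1 < b.1)) x acc)
      (l0 ++ l1 ++ l2)
      = (l0 ++ xs.filter (fun q => q.1 == 0)) ++ (l1 ++ xs.filter (fun q => q.1 == 1))
          ++ (l2 ++ xs.filter (fun q => q.1 == 2)) := by
  induction xs with
  | nil => intro l0 l1 l2 _ _ _ _; simp
  | cons q xs ih =>
    intro l0 l1 l2 h0 h1 h2 hx
    have hq : q.1 ≤ 2 := hx q (by simp)
    simp only [List.foldl_cons]
    have hcase : q.1 = 0 ∨ q.1 = 1 ∨ q.1 = 2 := by omega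
    rcases hcase with hk | hk | hk
    · have e1 : PySem.List.insertBy (fun a b : Nat × α => decide (a.1 < b.1)) q (l0 ++ l1 ++ l2)
          = (l0 ++ [q]) ++ l1 ++ l2 := by
        rw [List.append_assoc l0 l1 l2,
            pvInsertBy_skip _ _ l0 (l1 ++ l2) (fun y hy => by simp [h0 y hy, hk]),
            pvInsertBy_front _ _ (l1 ++ l2) (fun z hz => by
              rcases List.mem_append.mp hz with h | h
              · simp [h1 z h, hk]
              · simp [h2 z h, hk])]
        simp [List.append_assoc]
      rw [e1, ih (l0 ++ [q]) l1 l2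
            (by intro p hp; rcases List.mem_append.mp hp with h | h
                · exact h0 p h
                · simp at h; simp [h, hk]) h1 h2
            (fun p hp => hx p (by simp [hp]))]
      simp [hk, List.append_assoc]
    · have e1 : PySem.List.insertBy (fun a b : Nat × α => decide (a.1 < b.1)) q (l0 ++ l1 ++ l2)
          = l0 ++ (l1 ++ [q]) ++ l2 := by
        rw [pvInsertBy_skip _ _ (l0 ++ l1) l2 (fun y hy => by
              rcases List.mem_append.mp hy with h | h
              · simp [h0 y h, hk]
              · simp [h1 y h, hk]),
            pvInsertBy_front _ _ l2 (fun z hz => by simp [h2 z hz, hk])]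
        simp [List.append_assoc]
      rw [e1, ih l0 (l1 ++ [q]) l2 h0
            (by intro p hp; rcases List.mem_append.mp hp with h | h
                · exact h1 p h
                · simp at h; simp [h, hk]) h2
            (fun p hp => hx p (by simp [hp]))]
      simp [hk, List.append_assoc]
    · have e1 : PySem.List.insertBy (fun a b : Nat × α => decide (a.1 < b.1)) q (l0 ++ l1 ++ l2)
          = l0 ++ l1 ++ (l2 ++ [q]) := by
        rw [PySem.List.insertBy_of_forall_not_before _ _ _ (fun y hy => by
              have : y.1 ≤ 2 := by
                rcases List.mem_append.mp hy with h | h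
                · rcases List.mem_append.mp h with h' | h'
                  · simp [h0 y h']
                  · simp [h1 y h']
                · simp [h2 y h]
              simp; omega)]
        simp [List.append_assoc]
      rw [e1, ih l0 l1 (l2 ++ [q]) h0 h1
            (by intro p hp; rcases List.mem_append.mp hp with h | h
                · exact h2 p h
                · simp at h; simp [h, hk])
            (fun p hp => hx p (by simp [hp]))]
      simp [hk, List.append_assoc]

theorem pvSortedThree {α : Type} (xs : List (Nat × α)) (h : ∀ q ∈ xs, q.1 ≤ 2) :
    PySem.List.sorted xs (fun q => q.1) false =
      xs.filter (fun q => q.1 == 0) ++ xs.filter (fun q => q.1 == 1)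
        ++ xs.filter (fun q => q.1 == 2) := by
  rw [PySem.List.sorted_eq_foldl_insertBy]
  have := pvFoldlInsThree xs [] [] [] (by simp) (by simp) (by simp) h
  simpa [List.append_assoc] using this

-- ===== VERDICT (by name: the statement is the Claim_ definition above) =====
theorem normalize_search_terms_spec : Claim_equal_normalize_search_terms := by
  intro category query terms _
  unfold Spec_normalize_search_terms normalize_search_terms normalize_search_terms_alt
  by_cases hcat : PySem.Str.lower category ≠ "laptop"
  · rw [if_pos hcat, if_pos hcat]
  · rw [if_neg hcat, if_neg hcat]
    set cleaned := (terms.map PySem.Str.strip).filter (fun s => !(s == "")) with hcl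
    have hall : ((cleaned.map (fun term => ((if pvThink term then (2 : Nat) else 0), term))).all
            (fun p => p.1 == 2))
        = (cleaned.filter (fun t => !(pvThink t)) == []) := by
      by_cases he : cleaned.filter (fun t => !(pvThink t)) = []
      · have hthink : ∀ t ∈ cleaned, pvThink t = true := by
          intro t ht
          cases hb : pvThink t with
          | true => rfl
          | false =>
            exfalso
            have : t ∈ cleaned.filter (fun t => !(pvThink t)) :=
              List.mem_filter.mpr ⟨ht, by simp [hb]⟩
            rw [he] at this
            simp at this
        rw [he]
        simp only [beq_self_eq_true]
        rw [List.all_eq_true]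
        intro p hp
        simp only [List.mem_map] at hp
        obtain ⟨t, ht, rfl⟩ := hp
        simp [hthink t ht]
      · have hne : (cleaned.filter (fun t => !(pvThink t)) == []) = false := by
          simp [he]
        rw [hne, List.all_eq_false]
        obtain ⟨t, ht'⟩ := List.exists_mem_of_ne_nil _ he
        have h1 := List.mem_filter.mp ht'
        have hb' : pvThink t = false := by simpa using h1.2
        refine ⟨(0, t), ?_, by simp⟩
        simp only [List.mem_map]
        exact ⟨t, h1.1, by simp [hb']⟩
    simp only [hall]
    by_cases he : cleaned.filter (fun t => !(pvThink t)) = []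
    · simp [he]
    · have hne : (cleaned.filter (fun t => !(pvThink t)) == []) = false := by
        simp [he]
      simp only [hne, Bool.false_eq_true, if_false]
      congr 1
      -- sorted-by-group equals the three concatenated blocks
      set tagged2 := cleaned.map (fun term => ((if pvThink term then (2 : Nat) else 0), term))
        ++ pvFallbackTerms.map (fun term => ((1 : Nat), term)) with ht2
      have hb : ∀ q ∈ tagged2, q.1 ≤ 2 := by
        intro q hq
        rcases List.mem_append.mp hq with h | h <;> simp only [List.mem_map] at h <;>
          obtain ⟨t, _, rfl⟩ := h
        · split <;> simp
        · simp
      rw [pvSortedThree tagged2 hb, ht2]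
      simp only [List.filter_append, List.filter_map, List.map_append, List.map_map]
      have p0 : (fun q : Nat × String => q.1 == 0) ∘ (fun term => ((if pvThink term then (2 : Nat) else 0), term)) = fun t => !(pvThink t) := by
        funext t; cases h : pvThink t <;> simp [h]
      have p1 : (fun q : Nat × String => q.1 == 1) ∘ (fun term => ((if pvThink term then (2 : Nat) else 0), term)) = fun _ => false := by
        funext t; cases h : pvThink t <;> simp [h]
      have p2 : (fun q : Nat × String => q.1 == 2) ∘ (fun term => ((if pvThink term then (2 : Nat) else 0), term)) = fun t => pvThink t := by
        funext t; cases h : pvThink t <;> simp [h]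
      have q0 : (fun q : Nat × String => q.1 == 0) ∘ (fun term : String => ((1 : Nat), term)) = fun _ => false := by funext t; simp
      have q1 : (fun q : Nat × String => q.1 == 1) ∘ (fun term : String => ((1 : Nat), term)) = fun _ => true := by funext t; simp
      have q2 : (fun q : Nat × String => q.1 == 2) ∘ (fun term : String => ((1 : Nat), term)) = fun _ => false := by funext t; simp
      rw [p0, p1, p2, q0, q1, q2]
      have s0 : (Prod.snd ∘ fun term : String => ((if pvThink term then (2 : Nat) else 0), term)) = fun t => t := by
        funext t; simp
      simp [s0]
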